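-- pv_equiv track=rewrite | github.com/gh123man/advent-of-code | 2023/12/12.py | isValidNext
-- ===== SOURCE A (Python) =====
-- def isValidNext(problem, size):
--     found = False
--     i = 0
--     for c in problem:
--         if c == "#":
--             found = True
--         elif found:
--             break
--         i += 1
--
--     l = 0
--     for c in problem[i:]:
--         if c == "#":
--             l += 1
--         elif l > 0:
--             break
--     return l == size
-- ===== SOURCE B (Python) =====
-- def isValidNext(problem, size):
--     runs = []
--     cur = 0
--     for c in problem:
--         if c == "#":
--             cur += 1
--         elif cur > 0:
--             runs.append(cur)
--             cur = 0
--     if cur > 0: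
--         runs.append(cur)
--     return (runs[1] if len(runs) > 1 else 0) == size
-- ===== Notes on version B (the rewrite author's own statement) =====
-- stated objective: alternative
-- what changed: Replaces A's two index-tracked scans (find the end of the first '#'-run, then slice and rescan) with one pass that materialises the list of '#'-run lengths and compares the second run (0 if absent) to size.
import Mathlib
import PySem

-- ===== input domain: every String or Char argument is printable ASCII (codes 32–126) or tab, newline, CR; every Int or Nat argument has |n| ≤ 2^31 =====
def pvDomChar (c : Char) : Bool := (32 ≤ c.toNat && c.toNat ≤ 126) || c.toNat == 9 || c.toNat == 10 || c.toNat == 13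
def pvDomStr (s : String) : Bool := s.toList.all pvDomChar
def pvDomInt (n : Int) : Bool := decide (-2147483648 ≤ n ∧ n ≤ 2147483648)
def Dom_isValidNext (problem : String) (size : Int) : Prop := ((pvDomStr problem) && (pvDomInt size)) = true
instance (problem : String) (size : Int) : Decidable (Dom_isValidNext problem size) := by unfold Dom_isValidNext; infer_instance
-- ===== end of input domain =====

-- B replaces A's two index-tracked scans with one pass building the list of '#'-run lengths;
-- objective: alternative (same O(n) cost, different decomposition).

-- ===== PORT A =====
-- first loop of A: returns the final value of i (the index where the loop broke, or len(problem))
def pvLoop1 : List Char → Bool → Int → Int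
  | [], _, i => i
  | c :: cs, found, i =>
    if c = '#' then pvLoop1 cs true (i + 1)
    else if found then i
    else pvLoop1 cs found (i + 1)

-- second loop of A: counts the first '#'-run of its argument into l
def pvLoop2 : List Char → Int → Int
  | [], l => l
  | c :: cs, l =>
    if c = '#' then pvLoop2 cs (l + 1)
    else if l > 0 then l
    else pvLoop2 cs l

def isValidNext (problem : String) (size : Int) : Bool :=
  decide (pvLoop2 (PySem.List.slice problem.toList (some (pvLoop1 problem.toList false 0)) none) 0 = size)

-- ===== PORT B =====
-- loop body of B: fold state is (runs, cur)
def pvStepB (st : List Int × Int) (c : Char) : List Int × Int :=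
  if c = '#' then (st.1, st.2 + 1)
  else if st.2 > 0 then (st.1 ++ [st.2], 0)
  else st

-- the final 'if cur > 0: runs.append(cur)' of B
def pvFinish (st : List Int × Int) : List Int :=
  if st.2 > 0 then st.1 ++ [st.2] else st.1

-- 'runs[1] if len(runs) > 1 else 0'
def pvSecond (runs : List Int) : Int :=
  if runs.length > 1 then runs.getD 1 0 else 0

def isValidNext_alt (problem : String) (size : Int) : Bool :=
  decide (pvSecond (pvFinish (problem.toList.foldl pvStepB ([], 0))) = size)

-- ===== PRECONDITION & SPEC =====
def Spec_isValidNext (problem : String) (size : Int) (out : Bool) : Prop := out = isValidNext_alt problem size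
instance (problem : String) (size : Int) (out : Bool) : Decidable (Spec_isValidNext problem size out) := by unfold Spec_isValidNext; infer_instance

-- ===== CLAIM (what is proved, stated in full; the proofs are below) =====
def Claim_equal_isValidNext : Prop := ∀ (problem : String) (size : Int), Dom_isValidNext problem size → Spec_isValidNext problem size (isValidNext problem size)

-- ===== LEMMAS AND PROOFS =====

def pvH (c : Char) : Bool := c = '#'
def pvNH (c : Char) : Bool := !(c = '#')

-- the second '#'-run length of a char list, as takeWhile/dropWhile combinators
def pvRun2 (l : List Char) : Int :=
  ((((l.dropWhile pvNH).dropWhile pvH).dropWhile pvNH).takeWhile pvH).length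

-- structural reformulation of B's fold (runs produced after state cur, acc-free)
def pvRunsCore : List Char → Int → List Int
  | [], cur => if cur > 0 then [cur] else []
  | c :: cs, cur =>
    if c = '#' then pvRunsCore cs (cur + 1)
    else if cur > 0 then cur :: pvRunsCore cs 0
    else pvRunsCore cs cur

theorem pvDropWhile_head (p : Char → Bool) (l : List Char) (c : Char) (cs : List Char)
    (h : l.dropWhile p = c :: cs) : p c = false := by
  induction l with
  | nil => simp at h
  | cons a as ih =>
    rw [List.dropWhile_cons] at h
    by_cases hp : p a
    · exact ih (by simpa [hp] using h)
    · simp [hp] at h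
      rw [← h.1]; simpa using hp

theorem pvFold_eq_core (l : List Char) (acc : List Int) (cur : Int) :
    pvFinish (l.foldl pvStepB (acc, cur)) = acc ++ pvRunsCore l cur := by
  induction l generalizing acc cur with
  | nil => simp [pvFinish, pvRunsCore]; split <;> simp
  | cons c cs ih =>
    simp only [List.foldl_cons, pvStepB, pvRunsCore]
    by_cases h : c = '#'
    · simp [h, ih]
    · by_cases h2 : cur > 0 <;> simp [h, h2, ih]

theorem pvRunsCore_pos (l : List Char) (cur : Int) (h : cur > 0) :
    pvRunsCore l cur = (cur + ((l.takeWhile pvH).length : Int)) :: pvRunsCore (l.dropWhile pvH) 0 := by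
  induction l generalizing cur with
  | nil => simp [pvRunsCore, h]
  | cons c cs ih =>
    by_cases hc : c = '#'
    · simp only [pvRunsCore, if_pos hc, List.takeWhile, List.dropWhile, pvH, hc]
      rw [ih (cur + 1) (by omega)]
      simp; ring_nf
    · simp [pvRunsCore, hc, h, pvH, List.takeWhile_cons, List.dropWhile_cons]

theorem pvRunsCore_skip (l : List Char) :
    pvRunsCore l 0 = pvRunsCore (l.dropWhile pvNH) 0 := by
  induction l with
  | nil => simp
  | cons c cs ih =>
    by_cases hc : c = '#'
    · simp [pvNH, hc, List.dropWhile_cons]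
    · simp [pvRunsCore, hc, pvNH, List.dropWhile_cons, ih]

-- head of pvRunsCore _ 0 is the first '#'-run length (0 if none)
theorem pvRunsCore_head (l : List Char) :
    (pvRunsCore l 0).getD 0 0 = (((l.dropWhile pvNH).takeWhile pvH).length : Int) := by
  rw [pvRunsCore_skip]
  cases hm : l.dropWhile pvNH with
  | nil => simp [pvRunsCore]
  | cons c cs =>
    have hc' : c = '#' := by simpa [pvNH] using pvDropWhile_head pvNH l c cs hm
    simp only [pvRunsCore, if_pos hc', if_neg (by omega : ¬ ((0:Int) > 0)), zero_add]
    rw [pvRunsCore_pos cs 1 (by omega)]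
    simp [List.takeWhile_cons, pvH, hc']
    ring

-- A-side characterisations ----------------------------------------------------

theorem pvLoop1_true (l : List Char) (i : Int) :
    pvLoop1 l true i = i + ((l.takeWhile pvH).length : Int) := by
  induction l generalizing i with
  | nil => simp [pvLoop1]
  | cons c cs ih =>
    by_cases hc : c = '#'
    · simp [pvLoop1, hc, pvH, ih]; ring
    · simp [pvLoop1, hc, pvH]

theorem pvLoop1_false (l : List Char) (i : Int) :
    pvLoop1 l false i =
      i + ((l.takeWhile pvNH).length : Int) + (((l.dropWhile pvNH).takeWhile pvH).length : Int) := by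
  induction l generalizing i with
  | nil => simp [pvLoop1]
  | cons c cs ih =>
    by_cases hc : c = '#'
    · simp [pvLoop1, hc, pvNH, pvH, pvLoop1_true]
      ring
    · simp [pvLoop1, hc, pvNH, ih]
      ring

theorem pvLoop2_pos (l : List Char) (k : Int) (h : k > 0) :
    pvLoop2 l k = k + ((l.takeWhile pvH).length : Int) := by
  induction l generalizing k with
  | nil => simp [pvLoop2]
  | cons c cs ih =>
    by_cases hc : c = '#'
    · simp [pvLoop2, hc, pvH, ih (k + 1) (by omega)]; ring
    · simp [pvLoop2, hc, h, pvH]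

theorem pvLoop2_zero (l : List Char) :
    pvLoop2 l 0 = (((l.dropWhile pvNH).takeWhile pvH).length : Int) := by
  induction l with
  | nil => simp [pvLoop2]
  | cons c cs ih =>
    by_cases hc : c = '#'
    · simp only [pvLoop2, if_pos hc, zero_add]
      rw [pvLoop2_pos cs 1 (by omega)]
      simp [pvNH, pvH, hc, List.dropWhile_cons, List.takeWhile_cons]
      ring
    · simp [pvLoop2, hc, pvNH, ih]

-- the slice taken by A is the tail after the first '#'-run
theorem pvSlice_eq (l : List Char) :
    PySem.List.slice l (some (pvLoop1 l false 0)) none = (l.dropWhile pvNH).dropWhile pvH := by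
  have hdecomp : l = (l.takeWhile pvNH ++ (l.dropWhile pvNH).takeWhile pvH) ++ (l.dropWhile pvNH).dropWhile pvH := by
    rw [List.append_assoc, List.takeWhile_append_dropWhile, List.takeWhile_append_dropWhile]
  rw [pvLoop1_false]
  have hlen : (0:Int) + ((l.takeWhile pvNH).length : Int) + (((l.dropWhile pvNH).takeWhile pvH).length : Int)
      = ((l.takeWhile pvNH ++ (l.dropWhile pvNH).takeWhile pvH).length : Int) := by
    push_cast [List.length_append]; ring
  rw [hlen, PySem.List.slice_from_natCast]
  nth_rewrite 3 [hdecomp]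
  exact List.drop_left ..

-- each side equals pvRun2 ------------------------------------------------------

theorem pvA_eq (problem : String) (size : Int) :
    isValidNext problem size = decide (pvRun2 problem.toList = size) := by
  unfold isValidNext pvRun2
  rw [pvSlice_eq, pvLoop2_zero]

theorem pvB_eq (problem : String) (size : Int) :
    isValidNext_alt problem size = decide (pvRun2 problem.toList = size) := by
  unfold isValidNext_alt
  have h := pvFold_eq_core problem.toList [] 0
  simp only [List.nil_append] at h
  rw [h]
  congr 1
  rw [pvSecond, pvRunsCore_skip]
  cases hm : problem.toList.dropWhile pvNH with
  | nil => simp [pvRunsCore, pvRun2, hm]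
  | cons c cs =>
    have hc' : c = '#' := by simpa [pvNH] using pvDropWhile_head pvNH problem.toList c cs hm
    simp only [pvRunsCore, if_pos hc', if_neg (by omega : ¬ ((0:Int) > 0)), zero_add]
    rw [pvRunsCore_pos cs 1 (by omega)]
    have hd : (problem.toList.dropWhile pvNH).dropWhile pvH = cs.dropWhile pvH := by
      rw [hm]; simp [List.dropWhile_cons, pvH, hc']
    unfold pvRun2
    rw [hd]
    simp only [List.length_cons, List.getD_cons_succ]
    rw [← pvRunsCore_head (cs.dropWhile pvH)]
    rcases Nat.eq_zero_or_pos (pvRunsCore (cs.dropWhile pvH) 0).length with h0 | hp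
    · rw [List.length_eq_zero_iff] at h0
      simp [h0]
    · simp only [List.getD]
      have : 1 < (pvRunsCore (cs.dropWhile pvH) 0).length + 1 := by omega
      simp [this, List.getD, hp]

-- ===== VERDICT (by name: the statement is the Claim_ definition above) =====
theorem isValidNext_spec : Claim_equal_isValidNext := by
  intro problem size _
  unfold Spec_isValidNext
  rw [pvA_eq, pvB_eq]
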